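-- pv_equiv track=rewrite | github.com/dimi-it/challenge-ai-2026 | main.py | _parse_flagged_transaction_ids
-- ===== SOURCE A (Python) =====
-- from typing import Any, Dict, List, Set, Tuple
--
-- def _parse_flagged_transaction_ids(decision_text: str, valid_ids: Set[str]) -> List[str]:
--     flagged_ids: List[str] = []
--     for raw_line in decision_text.splitlines():
--         line = raw_line.strip()
--         if not line.startswith("-"):
--             continue
--         candidate = line[1:].strip()
--         if candidate.upper() == "NONE":
--             return []
--         if candidate in valid_ids:
--             flagged_ids.append(candidate)
--     return list(dict.fromkeys(flagged_ids))
-- ===== SOURCE B (Python) =====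
-- def _parse_flagged_transaction_ids(decision_text, valid_ids):
--     candidates = [s[1:].strip()
--                   for s in (l.strip() for l in decision_text.splitlines())
--                   if s.startswith("-")]
--     if any(c.upper() == "NONE" for c in candidates):
--         return []
--     # Invert the loops: look each valid id up in the candidate stream,
--     # then order the hits by their first position among the candidates.
--     found = [(candidates.index(v), v) for v in valid_ids if v in candidates]
--     found.sort(key=lambda t: t[0])
--     return [v for _, v in found]
-- ===== Notes on version B (the rewrite author's own statement) =====
-- stated objective: alternative
-- what changed: B inverts the loops: instead of A's single scan over the lines that tests each candidate against the id set and dedups at the end, B extracts the candidate list, short-circuits on NONE, then iterates over the VALID IDS, locating each id's first position in the candidate stream with list.index and sorting the hits by that position.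
import Mathlib
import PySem

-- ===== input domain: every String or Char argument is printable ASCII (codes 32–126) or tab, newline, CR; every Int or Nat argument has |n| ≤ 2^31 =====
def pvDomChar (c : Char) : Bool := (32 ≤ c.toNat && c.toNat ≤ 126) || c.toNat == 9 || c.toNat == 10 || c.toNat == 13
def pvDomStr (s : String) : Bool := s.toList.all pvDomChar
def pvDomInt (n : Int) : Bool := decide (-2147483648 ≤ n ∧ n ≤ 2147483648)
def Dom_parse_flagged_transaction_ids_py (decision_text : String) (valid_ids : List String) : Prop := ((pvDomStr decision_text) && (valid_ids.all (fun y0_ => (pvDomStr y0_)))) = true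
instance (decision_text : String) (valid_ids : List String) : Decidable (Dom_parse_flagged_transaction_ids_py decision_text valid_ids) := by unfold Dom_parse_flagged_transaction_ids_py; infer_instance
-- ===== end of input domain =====

-- B inverts the loops: instead of A's scan over the lines filtering against the id set, B looks each valid id up in the candidate stream and sorts the hits by first position; same output, alternative algorithm.


-- ===== PORT A =====
-- A's loop over the lines carrying the accumulated flagged ids; early return [] on a NONE
-- candidate, list(dict.fromkeys(...)) = PySem.List.dedup at the end.
def parseA_loop (valid_ids : List String) : List String → List String → List String
  | [], flagged => PySem.List.dedup flagged
  | raw_line :: rest, flagged =>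
    let line := PySem.Str.strip raw_line
    if ¬ PySem.Str.startswith line "-" then parseA_loop valid_ids rest flagged
    else
      let candidate := PySem.Str.strip (PySem.Str.slice line (some 1) none)
      if PySem.Str.upper candidate = "NONE" then []
      else if valid_ids.contains candidate then parseA_loop valid_ids rest (flagged ++ [candidate])
      else parseA_loop valid_ids rest flagged

def parse_flagged_transaction_ids_py (decision_text : String) (valid_ids : List String) : List String :=
  parseA_loop valid_ids (PySem.Str.splitlines decision_text) []

-- ===== PORT B =====
-- B's candidate comprehension: strip every line, keep the ones starting with '-', strip off the dash.
def parseB_candidates (decision_text : String) : List String :=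
  (((PySem.Str.splitlines decision_text).map PySem.Str.strip).filter
      (fun s => PySem.Str.startswith s "-")).map
    (fun s => PySem.Str.strip (PySem.Str.slice s (some 1) none))

-- B: short-circuit on any NONE candidate, then look each valid id up in the candidate stream
-- ('if v in candidates' then 'candidates.index(v)'; the '.getD 0' default is unreachable under the
-- guard, where Python's .index would raise) and sort the hits by first position.
def parse_flagged_transaction_ids_py_alt (decision_text : String) (valid_ids : List String) : List String :=
  let candidates := parseB_candidates decision_text
  if candidates.any (fun c => PySem.Str.upper c = "NONE") then []
  else
    let found := valid_ids.filterMap (fun v =>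
      if candidates.contains v then some (((PySem.List.index? candidates v).getD 0 : Nat), v) else none)
    (PySem.List.sorted found (fun t => t.1) false).map Prod.snd

-- ===== PRECONDITION & SPEC =====
-- valid_ids ports a Python set, whose elements are necessarily distinct; Pre_ only states that
-- set representation invariant (a list with duplicates corresponds to no Python input).
def Pre_parse_flagged_transaction_ids_py (decision_text : String) (valid_ids : List String) : Prop :=
  valid_ids.Nodup
instance (decision_text : String) (valid_ids : List String) : Decidable (Pre_parse_flagged_transaction_ids_py decision_text valid_ids) := by unfold Pre_parse_flagged_transaction_ids_py; infer_instance

def pvWitness_parse_flagged_transaction_ids_py : String × List String :=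
  ("- tx1\nskip\n- tx2\n- tx1", ["tx2", "tx1", "tx9"])

def Spec_parse_flagged_transaction_ids_py (decision_text : String) (valid_ids : List String) (out : List String) : Prop := out = parse_flagged_transaction_ids_py_alt decision_text valid_ids
instance (decision_text : String) (valid_ids : List String) (out : List String) : Decidable (Spec_parse_flagged_transaction_ids_py decision_text valid_ids out) := by unfold Spec_parse_flagged_transaction_ids_py; infer_instance

-- ===== CLAIM (what is proved, stated in full; the proofs are below) =====
def Claim_equal_parse_flagged_transaction_ids_py : Prop := ∀ (decision_text : String) (valid_ids : List String), Dom_parse_flagged_transaction_ids_py decision_text valid_ids → Pre_parse_flagged_transaction_ids_py decision_text valid_ids → Spec_parse_flagged_transaction_ids_py decision_text valid_ids (parse_flagged_transaction_ids_py decision_text valid_ids)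

-- ===== LEMMAS AND PROOFS =====

-- A's loop on any suffix of the lines equals 'if any candidate is NONE then [] else dedup of the valid candidates'.
lemma parseA_loop_eq (valid_ids : List String) (ls : List String) (flagged : List String) :
    parseA_loop valid_ids ls flagged =
      (let cs := ((ls.map PySem.Str.strip).filter (fun s => PySem.Str.startswith s "-")).map
          (fun s => PySem.Str.strip (PySem.Str.slice s (some 1) none));
       if cs.any (fun c => PySem.Str.upper c = "NONE") then []
       else PySem.List.dedup (flagged ++ cs.filter (fun c => valid_ids.contains c))) := by
  induction ls generalizing flagged with
  | nil => simp [parseA_loop]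
  | cons raw rest ih =>
    by_cases hs : PySem.Chars.startswith (PySem.Chars.strip raw.toList) ['-'] = true
    · by_cases hn : PySem.Str.upper (PySem.Str.strip (PySem.Str.slice (PySem.Str.strip raw) (some 1) none)) = "NONE"
      · simp [parseA_loop, hs, hn]
      · by_cases hv : PySem.Str.strip (PySem.Str.slice (PySem.Str.strip raw) (some 1) none) ∈ valid_ids
        · simp [parseA_loop, hs, hn, hv, ih, List.append_assoc]
        · simp [parseA_loop, hs, hn, hv, ih]
    · simp [parseA_loop, hs, ih]

-- 'list comprehension with an if' = filter-then-map.
lemma filterMap_if_eq (V cs : List String) :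
    (V.filterMap (fun v =>
      if cs.contains v then some (((PySem.List.index? cs v).getD 0 : Nat), v) else none)) =
    (V.filter (fun v => cs.contains v)).map (fun v => (((PySem.List.index? cs v).getD 0 : Nat), v)) := by
  induction V with
  | nil => rfl
  | cons v V ih => by_cases h : v ∈ cs <;> simp [h] <;> simpa using ih

-- folding Set.add from any accumulator appends exactly the new distinct elements.
lemma foldl_add_eq (l acc : List String) :
    l.foldl PySem.Set.add acc = acc ++ (PySem.Set.ofList l).filter (fun y => !acc.contains y) := by
  induction l generalizing acc with
  | nil => simp [PySem.Set.ofList, PySem.Set.empty]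
  | cons x l ih =>
    have hofl : PySem.Set.ofList (x :: l) = x :: (PySem.Set.ofList l).filter (fun y => !(y == x)) := by
      show List.foldl PySem.Set.add PySem.Set.empty (x :: l) = _
      rw [List.foldl_cons]
      have h0 : PySem.Set.add PySem.Set.empty x = [x] := by simp [PySem.Set.add, PySem.Set.empty]
      rw [h0, ih]
      refine List.cons_eq_cons.mpr ⟨rfl, List.filter_congr ?_⟩
      intro y _; by_cases hyx : y = x <;> simp [hyx]
    rw [List.foldl_cons, ih, hofl]
    by_cases hc : x ∈ acc
    · have hadd : PySem.Set.add acc x = acc := by simp [PySem.Set.add, hc]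
      rw [hadd]
      have hx : (!acc.contains x) = false := by simp [hc]
      rw [List.filter_cons_of_neg (by simp [hc]), List.filter_filter]
      refine congrArg (acc ++ ·) (List.filter_congr ?_)
      intro y _; by_cases hyx : y = x <;> simp [hyx, hc]
    · have hadd : PySem.Set.add acc x = acc ++ [x] := by simp [PySem.Set.add, hc]
      rw [hadd, List.filter_cons_of_pos (by simp [hc]), List.append_assoc]
      refine congrArg (acc ++ ·) ?_
      rw [List.filter_filter]
      refine congrArg (x :: ·) (List.filter_congr ?_)
      intro y _; by_cases hyx : y = x <;> simp [hyx, hc]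

-- first-occurrence dedup of a cons.
lemma dedup_cons (x : String) (l : List String) :
    PySem.List.dedup (x :: l) = x :: (PySem.List.dedup l).filter (fun y => !(y == x)) := by
  show List.foldl PySem.Set.add PySem.Set.empty (x :: l) = _
  rw [List.foldl_cons]
  have h0 : PySem.Set.add PySem.Set.empty x = [x] := by simp [PySem.Set.add, PySem.Set.empty]
  rw [h0, foldl_add_eq]
  refine List.cons_eq_cons.mpr ⟨rfl, List.filter_congr ?_⟩
  intro y _; by_cases hyx : y = x <;> simp [hyx]

-- dedup commutes with filter.
lemma dedup_filter (p : String → Bool) (l : List String) :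
    PySem.List.dedup (l.filter p) = (PySem.List.dedup l).filter p := by
  induction l with
  | nil => rfl
  | cons x l ih =>
    by_cases hp : p x = true
    · rw [List.filter_cons_of_pos hp, dedup_cons, dedup_cons, ih,
        List.filter_cons_of_pos hp, List.filter_filter, List.filter_filter]
      refine congrArg (x :: ·) (List.filter_congr ?_)
      intro y _; by_cases hyx : y = x
      · simp [hyx, hp]
      · exact Bool.and_comm _ _
    · rw [List.filter_cons_of_neg hp, dedup_cons, ih,
        List.filter_cons_of_neg hp, List.filter_filter]
      refine List.filter_congr ?_
      intro y _; by_cases hyx : y = x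
      · subst hyx; simp [hp]
      · simp [hyx]

-- dedup lists elements in order of first occurrence: first indices are strictly increasing.
lemma dedup_pairwise_index (l : List String) :
    (PySem.List.dedup l).Pairwise
      (fun a b => ((PySem.List.index? l a).getD 0 : Nat) < ((PySem.List.index? l b).getD 0 : Nat)) := by
  induction l with
  | nil => simp [PySem.List.dedup, PySem.Set.ofList, PySem.Set.empty]
  | cons x l ih =>
    rw [dedup_cons]
    refine List.Pairwise.cons ?_ ?_
    · intro b hb
      have hbd : b ∈ PySem.List.dedup l ∧ ¬ b = x := by simpa using List.mem_filter.mp hb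
      have hbl : b ∈ l := (PySem.Set.mem_ofList l b).mp hbd.1
      obtain ⟨k, hk⟩ := Option.isSome_iff_exists.mp ((PySem.List.index?_isSome_iff l b).mpr hbl)
      rw [PySem.List.index?_cons_self, PySem.List.index?_cons_of_ne l (fun h => hbd.2 h.symm), hk]
      simp
    · refine (ih.filter (fun y => !(y == x))).imp_of_mem ?_
      intro a b ha hb hab
      have hax : ¬ a = x := by simpa using (List.mem_filter.mp ha).2
      have hbx : ¬ b = x := by simpa using (List.mem_filter.mp hb).2
      have hal : a ∈ l := (PySem.Set.mem_ofList l a).mp (List.mem_filter.mp ha).1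
      have hbl : b ∈ l := (PySem.Set.mem_ofList l b).mp (List.mem_filter.mp hb).1
      obtain ⟨j, hj⟩ := Option.isSome_iff_exists.mp ((PySem.List.index?_isSome_iff l a).mpr hal)
      obtain ⟨k, hk⟩ := Option.isSome_iff_exists.mp ((PySem.List.index?_isSome_iff l b).mpr hbl)
      rw [PySem.List.index?_cons_of_ne l (fun h => hax h.symm),
        PySem.List.index?_cons_of_ne l (fun h => hbx h.symm), hj, hk]
      rw [hj, hk] at hab
      simpa using Nat.add_lt_add_right (by simpa using hab) 1

-- ===== VERDICT (by name: the statement is the Claim_ definition above) =====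
theorem parse_flagged_transaction_ids_py_spec : Claim_equal_parse_flagged_transaction_ids_py := by
  intro decision_text valid_ids _ hpre
  unfold Spec_parse_flagged_transaction_ids_py parse_flagged_transaction_ids_py parse_flagged_transaction_ids_py_alt
  rw [parseA_loop_eq]
  dsimp only [parseB_candidates]
  rw [filterMap_if_eq]
  set cs := (((PySem.Str.splitlines decision_text).map PySem.Str.strip).filter
      (fun s => PySem.Str.startswith s "-")).map
    (fun s => PySem.Str.strip (PySem.Str.slice s (some 1) none)) with hcs
  by_cases hnone : cs.any (fun c => PySem.Str.upper c = "NONE") = true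
  · simp [hnone]
  · simp only [hnone, if_neg, Bool.not_eq_true, List.nil_append]
    have hkey : PySem.List.sorted
        ((valid_ids.filter (fun v => cs.contains v)).map
          (fun v => (((PySem.List.index? cs v).getD 0 : Nat), v)))
        (fun t => t.1) false =
        ((PySem.List.dedup cs).filter (fun c => valid_ids.contains c)).map
          (fun v => (((PySem.List.index? cs v).getD 0 : Nat), v)) := by
      refine PySem.List.sorted_eq_of_perm_of_pairwise_lt _ _ _ ?_ ?_
      · refine List.Perm.map _ ?_
        refine (List.perm_ext_iff_of_nodup
          ((PySem.Set.nodup_ofList cs).filter _) (hpre.filter _)).mpr ?_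
        intro a
        constructor
        · intro h
          obtain ⟨h1, h2⟩ := List.mem_filter.mp h
          exact List.mem_filter.mpr ⟨by simpa using h2, by
            simpa using (PySem.Set.mem_ofList cs a).mp h1⟩
        · intro h
          obtain ⟨h1, h2⟩ := List.mem_filter.mp h
          exact List.mem_filter.mpr ⟨(PySem.Set.mem_ofList cs a).mpr (by simpa using h2),
            by simpa using h1⟩
      · rw [List.pairwise_map]
        exact (dedup_pairwise_index cs).filter _
    rw [hkey, List.map_map]
    have hsnd : (Prod.snd ∘ fun v => (((PySem.List.index? cs v).getD 0 : Nat), v)) = id := rfl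
    rw [hsnd, List.map_id, dedup_filter]
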